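-- pv_equiv track=rewrite | github.com/limgeonho/algorithm_review | programmers/Lv1/카카오/비밀지도.py | solution
-- ===== SOURCE A (Python) =====
-- def solution(n, arr1, arr2):
--     answer = []
--     board1 = [0] * n
--     board2 = [0] * n
--     board3 = [[''] * n for _ in range(n)]
--
--     for i in range(n):
--         board1[i] = str(bin(arr1[i])[2:]).rjust(n, '0')
--
--     for i in range(n):
--         board2[i] = str(bin(arr2[i])[2:]).rjust(n, '0')
--
--     for i in range(n):
--         for j in range(n):
--             if board1[i][j] == '1' or board2[i][j] == '1' :
--                 board3[i][j] = '#'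
--             else:
--                 board3[i][j] = ' '
--
--     for i in range(n):
--         board3[i] = ''.join(board3[i])
--     answer = board3
--
--     return answer
-- ===== SOURCE B (Python) =====
-- def solution(n, arr1, arr2):
--     # per row: integer bitwise OR, fixed-width binary rendering, char translation
--     return [format(arr1[i] | arr2[i], 'b').zfill(n).replace('1', '#').replace('0', ' ')
--             for i in range(n)]
-- ===== Notes on version B (the rewrite author's own statement) =====
-- stated objective: simpler
-- what changed: Replaces A's four index loops and nested per-character comparison of two padded bit strings with a single comprehension doing one integer bitwise OR per row, a fixed-width binary rendering, and a character translation.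
-- outside the precondition, e.g. on solution(2, [5, 1], [0, 0]): A returns ['# ', ' #'], B returns ['# #', ' #']; on solution(3, [-1, 0, 0], [0, 0, 0]): A returns ['  #', '   ', '   '], B returns ['- #', '   ', '   ']
import Mathlib
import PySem

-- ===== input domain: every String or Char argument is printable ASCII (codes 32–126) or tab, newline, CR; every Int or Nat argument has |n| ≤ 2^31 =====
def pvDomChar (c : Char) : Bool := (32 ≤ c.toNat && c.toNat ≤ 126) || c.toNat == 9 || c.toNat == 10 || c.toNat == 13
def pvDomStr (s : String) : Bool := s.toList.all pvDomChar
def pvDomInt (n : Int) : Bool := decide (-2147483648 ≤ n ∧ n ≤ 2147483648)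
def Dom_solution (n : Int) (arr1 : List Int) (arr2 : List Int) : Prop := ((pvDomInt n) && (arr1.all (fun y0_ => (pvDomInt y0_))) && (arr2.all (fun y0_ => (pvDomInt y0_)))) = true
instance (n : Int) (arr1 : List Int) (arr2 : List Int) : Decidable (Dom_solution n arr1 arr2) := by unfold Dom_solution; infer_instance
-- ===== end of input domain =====

-- B replaces A's four index loops and nested per-character comparison of two zero-padded bit
-- strings by one integer bitwise OR per row plus a fixed-width binary rendering and char
-- translation (simpler).


-- ===== PORT A =====
-- the digit recursion bin performs for m > 0, most significant first (empty for 0)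
def pvBinGo (m : Nat) : List Char :=
  if h : m = 0 then []
  else pvBinGo (m / 2) ++ [if m % 2 = 1 then '1' else '0']
decreasing_by exact Nat.div_lt_self (Nat.pos_of_ne_zero h) (by omega)

-- bin(x)[2:]  ('0b101'[2:] = '101'; '-0b101'[2:] = 'b101'; bin(0)[2:] = '0')
def pvBinTail (x : Int) : List Char :=
  if x < 0 then 'b' :: pvBinGo x.natAbs
  else if x = 0 then ['0'] else pvBinGo x.toNat

-- s.rjust(n, '0')
def pvRjust (w : Nat) (l : List Char) : List Char := List.replicate (w - l.length) '0' ++ l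

def solution (n : Int) (arr1 : List Int) (arr2 : List Int) : List String :=
  let board1 := (PySem.List.pyRange 0 n 1).map
    (fun i => pvRjust n.toNat (pvBinTail (PySem.List.pyGetD arr1 i 0)))
  let board2 := (PySem.List.pyRange 0 n 1).map
    (fun i => pvRjust n.toNat (pvBinTail (PySem.List.pyGetD arr2 i 0)))
  let board3 := (PySem.List.pyRange 0 n 1).map
    (fun i => (PySem.List.pyRange 0 n 1).map
      (fun j => if PySem.List.pyGetD (PySem.List.pyGetD board1 i []) j ' ' = '1'
                   ∨ PySem.List.pyGetD (PySem.List.pyGetD board2 i []) j ' ' = '1'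
                then '#' else ' '))
  board3.map (fun row => String.ofList row)

-- ===== PORT B =====
-- binary digits of m > 0, most significant first (empty for 0)
def pvBits (m : Nat) : List Char :=
  if h : m = 0 then []
  else pvBits (m / 2) ++ [if m % 2 = 1 then '1' else '0']
decreasing_by exact Nat.div_lt_self (Nat.pos_of_ne_zero h) (by omega)

-- format(x, 'b')
def pvFormatB (x : Int) : List Char :=
  if x < 0 then '-' :: pvBits x.natAbs
  else if x = 0 then ['0'] else pvBits x.toNat

-- s.zfill(n): pad with '0' on the left, after a leading sign if present
def pvZfill (w : Nat) (l : List Char) : List Char :=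
  match l with
  | [] => List.replicate w '0'
  | c :: rest =>
    if c = '-' ∨ c = '+' then c :: (List.replicate (w - l.length) '0' ++ rest)
    else List.replicate (w - l.length) '0' ++ l

def solution_alt (n : Int) (arr1 : List Int) (arr2 : List Int) : List String :=
  (PySem.List.pyRange 0 n 1).map
    (fun i => String.ofList
      (((pvZfill n.toNat
            (pvFormatB (Int.lor (PySem.List.pyGetD arr1 i 0) (PySem.List.pyGetD arr2 i 0)))).map
          (fun c => if c = '1' then '#' else c)).map
        (fun c => if c = '0' then ' ' else c)))

-- ===== PRECONDITION & SPEC =====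
-- Pre_ requires both arrays to have length ≥ n (else A raises IndexError) and the first n
-- entries of both arrays to lie in [0, 2^n) — the problem's stated range; A still returns on
-- negative or oversized entries, but there it renders sign characters or the leftmost bits of
-- a misaligned string, a corner as defensible as B's low-bit-aligned rendering.
def Pre_solution (n : Int) (arr1 : List Int) (arr2 : List Int) : Prop :=
  n ≤ arr1.length ∧ n ≤ arr2.length ∧
  ∀ i ∈ List.range n.toNat,
    0 ≤ arr1.getD i 0 ∧ arr1.getD i 0 < 2 ^ n.toNat ∧
    0 ≤ arr2.getD i 0 ∧ arr2.getD i 0 < 2 ^ n.toNat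
instance (n : Int) (arr1 : List Int) (arr2 : List Int) : Decidable (Pre_solution n arr1 arr2) := by
  unfold Pre_solution; infer_instance

def pvWitness_solution : Int × List Int × List Int := (2, [1, 2], [2, 1])

def Spec_solution (n : Int) (arr1 : List Int) (arr2 : List Int) (out : List String) : Prop := out = solution_alt n arr1 arr2
instance (n : Int) (arr1 : List Int) (arr2 : List Int) (out : List String) : Decidable (Spec_solution n arr1 arr2 out) := by unfold Spec_solution; infer_instance

-- ===== CLAIM (what is proved, stated in full; the proofs are below) =====
def Claim_equal_solution : Prop := ∀ (n : Int) (arr1 : List Int) (arr2 : List Int), Dom_solution n arr1 arr2 → Pre_solution n arr1 arr2 → Spec_solution n arr1 arr2 (solution n arr1 arr2)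

-- ===== LEMMAS AND PROOFS =====

-- the w-bit big-endian rendering of m, position j showing bit (w-1-j)
def pvBitsF (w m : Nat) : List Char :=
  (List.range w).map (fun j => if m.testBit (w - 1 - j) then '1' else '0')

theorem pvBits_eq_pvBinGo (m : Nat) : pvBits m = pvBinGo m := by
  induction m using Nat.strong_induction_on with
  | _ m ih =>
    rw [pvBits, pvBinGo]
    split
    · rfl
    · rename_i h
      rw [ih (m / 2) (Nat.div_lt_self (Nat.pos_of_ne_zero h) (by omega))]

theorem pvBinGo_chars (m : Nat) : ∀ c ∈ pvBinGo m, c = '0' ∨ c = '1' := by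
  induction m using Nat.strong_induction_on with
  | _ m ih =>
    intro c hc
    rw [pvBinGo] at hc
    split at hc
    · simp at hc
    · rename_i h
      simp only [List.mem_append, List.mem_singleton] at hc
      rcases hc with hc | hc
      · exact ih (m / 2) (Nat.div_lt_self (Nat.pos_of_ne_zero h) (by omega)) c hc
      · split_ifs at hc <;> simp [hc]

theorem pvBitsF_zero (w : Nat) : pvBitsF w 0 = List.replicate w '0' := by
  simp [pvBitsF]

theorem pvBitsF_succ (w m : Nat) :
    pvBitsF (w + 1) m = pvBitsF w (m / 2) ++ [if m % 2 = 1 then '1' else '0'] := by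
  unfold pvBitsF
  rw [List.range_succ, List.map_append]
  congr 1
  · apply List.map_congr_left
    intro j hj
    simp only [List.mem_range] at hj
    have h1 : w + 1 - 1 - j = (w - 1 - j) + 1 := by omega
    rw [h1, Nat.testBit_succ]
  · simp [Nat.testBit_zero]

theorem pvBinGo_pad (w m : Nat) (h1 : 0 < m) (h2 : m < 2 ^ w) :
    List.replicate (w - (pvBinGo m).length) '0' ++ pvBinGo m = pvBitsF w m := by
  induction w generalizing m with
  | zero => omega
  | succ w ih =>
    rw [pvBinGo, dif_neg (by omega)]
    by_cases hm : m / 2 = 0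
    · have hm1 : m = 1 := by omega
      subst hm1
      rw [pvBitsF_succ, pvBitsF_zero]
      simp [pvBinGo]
    · have hlt : m / 2 < 2 ^ w := by
        apply Nat.div_lt_of_lt_mul
        rw [pow_succ] at h2
        omega
      have hrec := ih (m / 2) (Nat.pos_of_ne_zero hm) hlt
      have hA : w + 1 - (pvBinGo (m / 2) ++ [if m % 2 = 1 then '1' else '0']).length
          = w - (pvBinGo (m / 2)).length := by
        simp
      rw [hA, pvBitsF_succ, ← hrec, List.append_assoc]

-- the padded bin(x)[2:] of 0 ≤ x < 2^w, w ≥ 1, is the fixed-width rendering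
theorem pvRjust_binTail (w : Nat) (x : Int) (hw : 0 < w) (h0 : 0 ≤ x) (h2 : x < 2 ^ w) :
    pvRjust w (pvBinTail x) = pvBitsF w x.toNat := by
  unfold pvRjust pvBinTail
  rw [if_neg (by omega : ¬ x < 0)]
  by_cases hx : x = 0
  · subst hx
    rw [if_pos rfl]
    show List.replicate (w - 1) '0' ++ ['0'] = _
    rw [show Int.toNat 0 = 0 from rfl, pvBitsF_zero]
    conv_rhs => rw [show w = (w - 1) + 1 by omega, List.replicate_succ']
  · rw [if_neg hx]
    apply pvBinGo_pad
    · omega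
    · zify
      rw [Int.toNat_of_nonneg h0]
      exact_mod_cast h2

-- zfill of a signless string is plain left padding
theorem pvZfill_eq_pad (w : Nat) (l : List Char) (h : ∀ c ∈ l, c = '0' ∨ c = '1') :
    pvZfill w l = List.replicate (w - l.length) '0' ++ l := by
  cases l with
  | nil => simp [pvZfill]
  | cons c rest =>
    have hc := h c List.mem_cons_self
    rw [pvZfill.eq_def]
    exact if_neg (by rcases hc with rfl | rfl <;> decide)

theorem pvZfill_formatB (w : Nat) (x : Int) (hw : 0 < w) (h0 : 0 ≤ x) (h2 : x < 2 ^ w) :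
    pvZfill w (pvFormatB x) = pvBitsF w x.toNat := by
  have hfb : pvFormatB x = pvBinTail x := by
    unfold pvFormatB pvBinTail
    rw [if_neg (by omega : ¬ x < 0), if_neg (by omega : ¬ x < 0), pvBits_eq_pvBinGo]
  have hch : ∀ c ∈ pvFormatB x, c = '0' ∨ c = '1' := by
    rw [hfb]
    unfold pvBinTail
    rw [if_neg (by omega : ¬ x < 0)]
    split
    · intro c hc
      simp only [List.mem_singleton] at hc
      simp [hc]
    · exact pvBinGo_chars x.toNat
  rw [pvZfill_eq_pad w _ hch, hfb]
  exact pvRjust_binTail w x hw h0 h2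

-- Int.lor of nonnegatives, reduced to Nat
theorem int_lor_toNat (x y : Int) (hx : 0 ≤ x) (hy : 0 ≤ y) :
    (Int.lor x y).toNat = x.toNat ||| y.toNat := by
  obtain ⟨a, rfl⟩ := Int.eq_ofNat_of_zero_le hx
  obtain ⟨b, rfl⟩ := Int.eq_ofNat_of_zero_le hy
  rfl

theorem int_lor_nonneg (x y : Int) (hx : 0 ≤ x) (hy : 0 ≤ y) : 0 ≤ Int.lor x y := by
  obtain ⟨a, rfl⟩ := Int.eq_ofNat_of_zero_le hx
  obtain ⟨b, rfl⟩ := Int.eq_ofNat_of_zero_le hy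
  exact Int.natCast_nonneg _

theorem int_toNat_lt_pow {x : Int} {w : Nat} (h0 : 0 ≤ x) (h : x < 2 ^ w) :
    x.toNat < 2 ^ w := by
  zify
  rw [Int.toNat_of_nonneg h0]
  exact_mod_cast h

theorem int_lor_lt_two_pow (x y : Int) (w : Nat) (hx : 0 ≤ x) (hy : 0 ≤ y)
    (h2x : x < 2 ^ w) (h2y : y < 2 ^ w) : Int.lor x y < 2 ^ w := by
  have h := Nat.or_lt_two_pow (int_toNat_lt_pow hx h2x) (int_toNat_lt_pow hy h2y)
  have he : Int.lor x y = ((x.toNat ||| y.toNat : Nat) : Int) := by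
    rw [← int_lor_toNat x y hx hy, Int.toNat_of_nonneg (int_lor_nonneg x y hx hy)]
  rw [he]
  exact_mod_cast h

theorem pvBitsF_getD (w m j : Nat) (hj : j < w) :
    (pvBitsF w m).getD j ' ' = if m.testBit (w - 1 - j) then '1' else '0' := by
  unfold pvBitsF
  exact PySem.List.getD_map_range _ _ _ _ hj

-- one row: A's per-position comparison equals B's translation of the OR's rendering
theorem pv_row_eq (w a b : Nat) :
    (List.range w).map (fun j =>
        if (pvBitsF w a).getD j ' ' = '1' ∨ (pvBitsF w b).getD j ' ' = '1' then '#' else ' ')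
      = ((pvBitsF w (a ||| b)).map (fun c => if c = '1' then '#' else c)).map
          (fun c => if c = '0' then ' ' else c) := by
  conv_rhs => rw [pvBitsF, List.map_map, List.map_map]
  apply List.map_congr_left
  intro j hj
  simp only [List.mem_range] at hj
  rw [pvBitsF_getD w a j hj, pvBitsF_getD w b j hj]
  simp only [Function.comp_apply, Nat.testBit_lor]
  cases ha : a.testBit (w - 1 - j) <;> cases hb : b.testBit (w - 1 - j) <;> simp

-- ===== VERDICT (by name: the statement is the Claim_ definition above) =====
theorem solution_spec : Claim_equal_solution := by
  intro n arr1 arr2 _hdom hpre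
  obtain ⟨hl1, hl2, hvals⟩ := hpre
  unfold Spec_solution solution solution_alt
  simp only [PySem.List.pyRange_zero, List.map_map, Function.comp_def,
    PySem.List.pyGetD_natCast]
  apply List.map_congr_left
  intro i hi
  simp only [List.mem_range] at hi
  obtain ⟨ha0, ha2, hb0, hb2⟩ := hvals i (List.mem_range.mpr hi)
  set x := arr1.getD i 0 with hx
  set y := arr2.getD i 0 with hy
  have hwpos : 0 < n.toNat := by omega
  congr 1
  rw [PySem.List.getD_map_range _ _ _ _ hi, PySem.List.getD_map_range _ _ _ _ hi]
  rw [pvRjust_binTail n.toNat x hwpos ha0 ha2, pvRjust_binTail n.toNat y hwpos hb0 hb2]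
  rw [pvZfill_formatB n.toNat (Int.lor x y) hwpos (int_lor_nonneg x y ha0 hb0)
      (int_lor_lt_two_pow x y n.toNat ha0 hb0 ha2 hb2)]
  rw [int_lor_toNat x y ha0 hb0]
  simpa only [List.map_map, Function.comp_def] using pv_row_eq n.toNat x.toNat y.toNat
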